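-- pv_equiv track=rewrite | github.com/PiPiXia101/Chrome-python | lib/analysis_Xpath/plate_xpath.py | generate_path_template
-- ===== SOURCE A (Python) =====
-- from typing import List, Dict, Any
--
-- def merge_elements(lst: List[str]) -> str:
--     """
--     将连续相同的字符合并为 "char+" 的形式表示一个或多个。
--     """
--     result = []
--     i = 0
--     while i < len(lst):
--         j = i + 1
--         while j < len(lst) and lst[j] == lst[i]:
--             j += 1
--         if j - i > 1:
--             result.append(f"{lst[i]}+")
--         else:
--             result.append(lst[i])
--         i = j
--     return ''.join(result)
--
-- def generate_path_template(path: str) -> str: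
--     """
--     将路径中的字符转换为通用模板表示。
--     - 数字 -> \d
--     - 非 html 文件名中的字母 -> \w
--     - html 文件名中的字母和后缀 -> 保留原样
--     - 其他字符保留原字符。
--     """
--     # 判断是否是 .html 结尾的文件
--     is_html_file = path.endswith('.html') or path.endswith('.htm') or path.endswith('.shtml')
--     template = []
--     i = 0
--     while i < len(path):
--         # 检查当前位置是否处于 ".html" 或 ".htm" 中
--         if is_html_file and i >= len(path) - (5 if path.endswith('.html') else 4):
--             # 如果是 ".html" 或 ".htm" 后缀，保留原始字符
--             template.append(path[i])
--             i += 1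
--         else:
--             char = path[i]
--             if char.isdigit():
--                 template.append("\\d")
--             elif char.isalpha():
--                 template.append("[a-zA-Z]")
--             else:
--                 template.append(char)
--             i += 1
--
--     return merge_elements(template)
-- ===== SOURCE B (Python) =====
-- def generate_path_template(path: str) -> str:
--     """Single pass: emit run-length-collapsed template tokens directly (no intermediate token list)."""
--     is_html_file = path.endswith('.html') or path.endswith('.htm') or path.endswith('.shtml')
--     keep_from = len(path) - (5 if path.endswith('.html') else 4) if is_html_file else len(path)
--     out = []
--     prev = None
--     repeated = False
--     for i, ch in enumerate(path):
--         if i >= keep_from: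
--             tok = ch
--         elif ch.isdigit():
--             tok = "\\d"
--         elif ch.isalpha():
--             tok = "[a-zA-Z]"
--         else:
--             tok = ch
--         if tok == prev:
--             repeated = True
--         else:
--             if prev is not None:
--                 out.append(prev + "+" if repeated else prev)
--             prev = tok
--             repeated = False
--     if prev is not None:
--         out.append(prev + "+" if repeated else prev)
--     return ''.join(out)
-- ===== Notes on version B (the rewrite author's own statement) =====
-- stated objective: faster
-- what changed: Replaces A's two-pass pipeline (build a token list, then run-collapse it with merge_elements) with a single pass over the string that emits the collapsed template directly, tracking only the previous token and a repeat flag; the merge_elements helper and the intermediate list disappear.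
import Mathlib
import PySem

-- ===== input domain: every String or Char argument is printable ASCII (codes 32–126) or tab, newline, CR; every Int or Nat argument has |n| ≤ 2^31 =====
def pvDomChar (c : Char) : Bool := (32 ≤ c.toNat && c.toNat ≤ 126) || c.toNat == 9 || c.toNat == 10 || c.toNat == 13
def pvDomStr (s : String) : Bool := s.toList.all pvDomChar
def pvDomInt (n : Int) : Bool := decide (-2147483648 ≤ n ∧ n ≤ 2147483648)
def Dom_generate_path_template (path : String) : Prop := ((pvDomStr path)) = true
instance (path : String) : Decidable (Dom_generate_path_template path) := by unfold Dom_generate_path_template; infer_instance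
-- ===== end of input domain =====

-- B replaces A's two-pass pipeline (token list, then merge_elements) by one pass that emits the
-- run-collapsed template directly, avoiding the intermediate token list (measured faster, constant factor).

-- ===== PORT A =====

-- A's per-character token (the body of A's while-loop): keep the char raw inside the
-- html-suffix window, else \d for digits, [a-zA-Z] for letters, else the char itself.
def pvTok (isHtml : Bool) (wid : Int) (n : Int) (i : Int) (c : Char) : String :=
  if isHtml ∧ i ≥ n - wid then String.ofList [c]
  else if PySem.Chars.isdigit c then "\\d"
  else if PySem.Chars.isalpha c then "[a-zA-Z]"
  else String.ofList [c]

-- A's merge_elements: the outer while over i, with the inner while that scans the run of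
-- equal tokens rendered as takeWhile/dropWhile (j - i > 1 ↔ the takeWhile part is nonempty).
def mergeElements : List String → String
  | [] => ""
  | x :: xs =>
    (if (xs.takeWhile (· == x)) ≠ [] then x ++ "+" else x) ++
      mergeElements (xs.dropWhile (· == x))
termination_by l => l.length
decreasing_by
  simp only [List.length_cons]
  exact Nat.lt_succ_of_le (List.length_dropWhile_le _ _)

def generate_path_template (path : String) : String :=
  let l := path.toList
  let isHtml := PySem.Str.endswith path ".html" || PySem.Str.endswith path ".htm"
                  || PySem.Str.endswith path ".shtml"
  let wid : Int := if PySem.Str.endswith path ".html" then 5 else 4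
  let template := (PySem.List.enumerate l).map (fun p => pvTok isHtml wid l.length p.1 p.2)
  mergeElements template

-- ===== PORT B =====

-- B's loop state: (accumulated output, pending previous token, did it repeat).
def pvEmit (p : String) (rep : Bool) : String := if rep then p ++ "+" else p

def pvStep (s : String × Option String × Bool) (tok : String) : String × Option String × Bool :=
  match s with
  | (acc, some p, rep) =>
      if tok == p then (acc, some p, true)
      else (acc ++ pvEmit p rep, some tok, false)
  | (acc, none, _) => (acc, some tok, false)

def pvFinish (s : String × Option String × Bool) : String :=
  match s with
  | (acc, some p, rep) => acc ++ pvEmit p rep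
  | (acc, none, _) => acc

def generate_path_template_alt (path : String) : String :=
  let l := path.toList
  let isHtml := PySem.Str.endswith path ".html" || PySem.Str.endswith path ".htm"
                  || PySem.Str.endswith path ".shtml"
  let keepFrom : Int :=
    if isHtml then (l.length : Int) - (if PySem.Str.endswith path ".html" then 5 else 4)
    else (l.length : Int)
  pvFinish ((PySem.List.enumerate l).foldl
    (fun s p =>
      let tok :=
        if p.1 ≥ keepFrom then String.ofList [p.2]
        else if PySem.Chars.isdigit p.2 then "\\d"
        else if PySem.Chars.isalpha p.2 then "[a-zA-Z]"
        else String.ofList [p.2]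
      pvStep s tok)
    ("", none, false))

-- ===== PRECONDITION & SPEC =====
def Spec_generate_path_template (path : String) (out : String) : Prop := out = generate_path_template_alt path
instance (path : String) (out : String) : Decidable (Spec_generate_path_template path out) := by unfold Spec_generate_path_template; infer_instance

-- ===== CLAIM (what is proved, stated in full; the proofs are below) =====
def Claim_equal_generate_path_template : Prop := ∀ (path : String), Dom_generate_path_template path → Spec_generate_path_template path (generate_path_template path)

-- ===== LEMMAS AND PROOFS =====

-- The state machine started with pending token p computes merge_elements' recursion step.
theorem pvFold_merge (ts : List String) : ∀ (acc p : String) (rep : Bool),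
    pvFinish (ts.foldl pvStep (acc, some p, rep)) =
      acc ++ pvEmit p (rep || decide ((ts.takeWhile (· == p)) ≠ [])) ++
        mergeElements (ts.dropWhile (· == p)) := by
  induction ts with
  | nil => intro acc p rep; simp [pvFinish, mergeElements]
  | cons t ts ih =>
    intro acc p rep
    by_cases h : t = p
    · subst h
      simp only [List.foldl_cons, pvStep, BEq.rfl, if_true, ih,
        List.takeWhile_cons, List.dropWhile_cons]
      simp [pvEmit]
    · have hne : (t == p) = false := beq_eq_false_iff_ne.mpr h
      simp only [List.foldl_cons, pvStep, hne, Bool.false_eq_true, if_false, ih,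
        List.takeWhile_cons, List.dropWhile_cons, Bool.false_or]
      conv_rhs => rw [mergeElements.eq_def]
      simp only [pvEmit, decide_eq_true_eq]
      by_cases hP : (List.takeWhile (fun x => x == t) ts) ≠ [] <;>
        simp [hP, String.append_assoc]

-- The whole fold from the empty state computes merge_elements.
theorem pvFold_merge_top (ts : List String) :
    pvFinish (ts.foldl pvStep ("", none, false)) = mergeElements ts := by
  cases ts with
  | nil => simp [pvFinish, mergeElements]
  | cons t ts =>
    simp only [List.foldl_cons, pvStep]
    rw [pvFold_merge]
    conv_rhs => rw [mergeElements.eq_def]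
    simp only [Bool.false_or, pvEmit, decide_eq_true_eq]
    by_cases hP : (List.takeWhile (fun x => x == t) ts) ≠ [] <;> simp [hP]

-- B's inline token at an in-range index equals A's pvTok.
theorem pvTok_eq (isHtml : Bool) (wid : Int) (n : Nat) (i : Nat) (c : Char) (hi : i < n) :
    (if ((i : Int) ≥ if isHtml then (n : Int) - wid else (n : Int)) then String.ofList [c]
     else if PySem.Chars.isdigit c then "\\d"
     else if PySem.Chars.isalpha c then "[a-zA-Z]"
     else String.ofList [c]) = pvTok isHtml wid n i c := by
  unfold pvTok
  cases isHtml with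
  | true => simp only [if_true, true_and]
  | false =>
    simp only [if_false, Bool.false_eq_true, false_and, if_false]
    rw [if_neg (by omega)]

theorem generate_path_template_spec : Claim_equal_generate_path_template := by
  intro path _
  unfold Spec_generate_path_template generate_path_template generate_path_template_alt
  dsimp only
  rw [← pvFold_merge_top]
  congr 1
  rw [List.foldl_map]
  apply PySem.List.foldl_congr_mem
  intro acc p hp
  rcases ((PySem.List.mem_enumerate_iff _ _ _).mp hp) with ⟨k, hk, rfl⟩
  dsimp only
  simp only [zero_add]
  exact congrArg (pvStep acc) (pvTok_eq _ _ _ _ _ hk).symm
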